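-- pv_equiv track=rewrite | github.com/trongthanht3/Astar-impact | arumi-riddle.py | kick
-- ===== SOURCE A (Python) =====
-- def kick(state, place):
--     if place == 0:
--         state[place] += 1
--         state[place + 1] += 1
--         state[place + 2] += 1
--     if place == 1:
--         state[place] += 1
--         state[place - 1] += 1
--         state[place + 2] += 1
--     if place == 2:
--         state[place] += 1
--         state[place + 1] += 1
--         state[place - 2] += 1
--     if place == 3:
--         state[place] += 1
--         state[place - 1] += 1
--         state[place - 2] += 1
--     for i in range(len(state)):
--         if state[i] > 4:
--             state[i] = 1
--     return state
-- ===== SOURCE B (Python) =====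
-- def kick(state, place):
--     # Single fused pass: compute the one skipped index (3 - place) up front,
--     # then one while loop that bumps and clamps each cell in the same step,
--     # building a fresh list (no mutation of the argument).
--     skip = 3 - place if 0 <= place <= 3 else None
--     out = []
--     i = 0
--     n = len(state)
--     while i < n:
--         v = state[i] + 1 if (skip is not None and i < 4 and i != skip) else state[i]
--         out.append(1 if v > 4 else v)
--         i += 1
--     return out
-- ===== Notes on version B (the rewrite author's own statement) =====
-- stated objective: alternative
-- what changed: Replaces A's four constant-index in-place increment branches followed by a separate clamping pass with a single fused pass: the one skipped index (3-place) is computed up front and one while loop bumps and clamps each cell in the same step, building a fresh list instead of mutating the argument.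
import Mathlib
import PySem

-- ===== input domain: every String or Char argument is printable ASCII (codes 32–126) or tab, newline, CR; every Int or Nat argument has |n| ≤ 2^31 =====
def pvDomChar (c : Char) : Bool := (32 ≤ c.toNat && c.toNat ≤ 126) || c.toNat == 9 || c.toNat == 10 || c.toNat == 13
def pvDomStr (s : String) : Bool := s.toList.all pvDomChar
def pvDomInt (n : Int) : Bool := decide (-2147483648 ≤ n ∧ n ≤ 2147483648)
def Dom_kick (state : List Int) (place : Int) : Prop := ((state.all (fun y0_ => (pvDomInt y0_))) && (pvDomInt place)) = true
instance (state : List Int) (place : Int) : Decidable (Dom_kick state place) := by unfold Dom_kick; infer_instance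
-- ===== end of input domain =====

-- B computes the one skipped index (3-place) up front and does ONE fused pass that bumps and clamps each
-- cell in the same step, building a fresh list, instead of A's four constant-index in-place increment
-- branches followed by a separate clamping loop; equivalence is about the RETURN value only
-- (A mutates its argument in place, B does not).


-- ===== PORT A =====
-- state[i] += 1 (raises outside Pre_kick; pySetD/pyGetD are the total forms, used only under Pre_)
def bumpA (xs : List Int) (i : Int) : List Int :=
  PySem.List.pySetD xs i (PySem.List.pyGetD xs i 0 + 1)

def kick (state : List Int) (place : Int) : List Int :=
  let s0 := if place = 0 then bumpA (bumpA (bumpA state 0) 1) 2 else state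
  let s1 := if place = 1 then bumpA (bumpA (bumpA s0 1) 0) 3 else s0
  let s2 := if place = 2 then bumpA (bumpA (bumpA s1 2) 3) 0 else s1
  let s3 := if place = 3 then bumpA (bumpA (bumpA s2 3) 2) 1 else s2
  (PySem.List.pyRange 0 (s3.length : Int) 1).foldl
    (fun t i => if PySem.List.pyGetD t i 0 > 4 then PySem.List.pySetD t i 1 else t) s3

-- ===== PORT B =====
-- the while loop of Source B: fuel = number of remaining iterations (n - i), i the index, out the accumulator
def kickLoop (state : List Int) (skip : Option Int) : Nat → Int → List Int → List Int
  | 0, _, out => out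
  | m + 1, i, out =>
    let v := match skip with
      | some s => if i < 4 ∧ i ≠ s then PySem.List.pyGetD state i 0 + 1 else PySem.List.pyGetD state i 0
      | none => PySem.List.pyGetD state i 0
    kickLoop state skip m (i + 1) (out ++ [if v > 4 then 1 else v])

def kick_alt (state : List Int) (place : Int) : List Int :=
  let skip : Option Int := if 0 ≤ place ∧ place ≤ 3 then some (3 - place) else none
  kickLoop state skip state.length 0 []

-- ===== PRECONDITION & SPEC =====
-- Pre_ excludes exactly the inputs where A raises IndexError: place 0 needs 3 elements, places 1..3 need 4.
def Pre_kick (state : List Int) (place : Int) : Prop :=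
  (place = 0 → 3 ≤ state.length) ∧ ((place = 1 ∨ place = 2 ∨ place = 3) → 4 ≤ state.length)
instance (state : List Int) (place : Int) : Decidable (Pre_kick state place) := by
  unfold Pre_kick; infer_instance
def pvWitness_kick : List Int × Int := ([1, 2, 3, 4], 2)

def Spec_kick (state : List Int) (place : Int) (out : List Int) : Prop := out = kick_alt state place
instance (state : List Int) (place : Int) (out : List Int) : Decidable (Spec_kick state place out) := by
  unfold Spec_kick; infer_instance

-- ===== CLAIM (what is proved, stated in full; the proofs are below) =====
def Claim_equal_kick : Prop := ∀ (state : List Int) (place : Int), Dom_kick state place → Pre_kick state place → Spec_kick state place (kick state place)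

-- ===== LEMMAS AND PROOFS =====

theorem set_split {α : Type} (s : List α) (j : Nat) (a : α) (h : j < s.length) :
    s.set j a = s.take j ++ a :: s.drop (j + 1) := by
  induction s generalizing j with
  | nil => simp at h
  | cons x t ih =>
    cases j with
    | zero => simp
    | succ j => simp [ih j (by simpa using h)]

theorem take_len_append {α : Type} (A : List α) (x : α) (B : List α) :
    (A ++ x :: B).take (A.length + 1) = A ++ [x] := by
  induction A with
  | nil => simp
  | cons y t ih => simp [ih]

theorem drop_len_append {α : Type} (A : List α) (x : α) (B : List α) :
    (A ++ x :: B).drop (A.length + 1) = B := by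
  induction A with
  | nil => simp
  | cons y t ih => simp [ih]

theorem clamp_aux : ∀ (m j : Nat) (s : List Int), j + m = s.length →
    (PySem.List.pyRange (j : Int) (s.length : Int) 1).foldl
      (fun t i => if PySem.List.pyGetD t i 0 > 4 then PySem.List.pySetD t i 1 else t) s
    = s.take j ++ (s.drop j).map (fun v => if v > 4 then 1 else v) := by
  intro m
  induction m with
  | zero =>
    intro j s hj
    rw [PySem.List.pyRange_one_eq_nil (by omega : (s.length : Int) ≤ (j : Int))]
    simp [List.take_of_length_le (by omega : s.length ≤ j),
          List.drop_eq_nil_of_le (by omega : s.length ≤ j)]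
  | succ m ih =>
    intro j s hj
    have hjl : j < s.length := by omega
    have hcast : ((j : Int) + 1) = (((j + 1 : Nat)) : Int) := by push_cast; ring
    have hget : s.getD j 0 = s[j] := List.getD_eq_getElem s 0 hjl
    have htk : (s.take j).length = j := by simp; omega
    rw [PySem.List.pyRange_one_cons (by exact_mod_cast hjl)]
    simp only [List.foldl_cons, PySem.List.pyGetD_natCast, PySem.List.pySetD_natCast]
    by_cases hv : s.getD j 0 > 4
    · rw [if_pos hv, hcast,
         show (s.length : Int) = ((s.set j 1).length : Int) by simp,
         ih (j + 1) (s.set j 1) (by simp; omega)]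
      have e1 : (s.set j 1).take (j + 1) = s.take j ++ [1] := by
        rw [set_split s j 1 hjl, show j + 1 = (s.take j).length + 1 by omega, take_len_append]
      have e2 : (s.set j 1).drop (j + 1) = s.drop (j + 1) := by
        rw [set_split s j 1 hjl, show j + 1 = (s.take j).length + 1 by omega, drop_len_append]
      rw [List.drop_eq_getElem_cons hjl, List.map_cons, if_pos (by omega : s[j] > 4)]
      simp [e1, e2]
    · rw [if_neg hv, hcast, ih (j + 1) s (by omega)]
      have e3 : s.take (j + 1) = s.take j ++ [s[j]] := by
        conv_lhs => rw [← List.take_append_drop j s, List.drop_eq_getElem_cons hjl]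
        rw [show j + 1 = (s.take j).length + 1 by omega, take_len_append]
      rw [List.drop_eq_getElem_cons hjl, List.map_cons, if_neg (by omega : ¬ s[j] > 4)]
      rw [e3, List.append_assoc]
      simp only [List.cons_append, List.nil_append]

theorem clamp_fold (s : List Int) :
    (PySem.List.pyRange 0 (s.length : Int) 1).foldl
      (fun t i => if PySem.List.pyGetD t i 0 > 4 then PySem.List.pySetD t i 1 else t) s
    = s.map (fun v => if v > 4 then 1 else v) := by
  have h := clamp_aux s.length 0 s (by omega)
  simpa using h

theorem bump_chain (s : List Int) (a b c : Nat)
    (ha : a < s.length) (hb : b < s.length) (hc : c < s.length)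
    (hab : a ≠ b) (hac : a ≠ c) (hbc : b ≠ c) :
    bumpA (bumpA (bumpA s (a : Int)) (b : Int)) (c : Int)
    = (PySem.List.enumerate s).map
        (fun p => if p.1 = (a : Int) ∨ p.1 = (b : Int) ∨ p.1 = (c : Int) then p.2 + 1 else p.2) := by
  simp only [bumpA, PySem.List.pyGetD_natCast, PySem.List.pySetD_natCast]
  apply List.ext_getElem
  · simp [PySem.List.length_enumerate]
  · intro k hk1 hk2
    have hk : k < s.length := by simpa using hk1
    rw [List.getElem_map, PySem.List.getElem_enumerate]
    simp only [List.getD_eq_getElem?_getD, List.getElem?_set, List.getElem_set,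
               List.length_set, zero_add, Nat.cast_inj]
    split_ifs <;> simp_all <;> omega

theorem case_core (state : List Int) (a b c : Nat) (sk : Int)
    (ha : a < state.length) (hb : b < state.length) (hc : c < state.length)
    (hab : a ≠ b) (hac : a ≠ c) (hbc : b ≠ c)
    (hiff : ∀ k : Nat,
      (((k : Int) = (a : Int) ∨ (k : Int) = (b : Int) ∨ (k : Int) = (c : Int)) ↔
       ((k : Int) < 4 ∧ ¬ (k : Int) = sk))) :
    (PySem.List.pyRange 0 ((bumpA (bumpA (bumpA state (a : Int)) (b : Int)) (c : Int)).length : Int) 1).foldl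
      (fun t i => if PySem.List.pyGetD t i 0 > 4 then PySem.List.pySetD t i 1 else t)
      (bumpA (bumpA (bumpA state (a : Int)) (b : Int)) (c : Int))
    = ((PySem.List.enumerate state).map
        (fun p => if p.1 < 4 ∧ ¬ p.1 = sk then p.2 + 1 else p.2)).map
        (fun v => if v > 4 then 1 else v) := by
  rw [bump_chain state a b c ha hb hc hab hac hbc, clamp_fold, List.map_map, List.map_map]
  apply List.map_congr_left
  intro p hp
  rcases (PySem.List.mem_enumerate_iff _ _ _).1 hp with ⟨k, hkl, rfl⟩
  simp only [Function.comp_apply, zero_add, hiff k]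

-- B's while loop with skip = some sk produces the bump-then-clamp map of the untreated suffix
theorem kickLoop_some (state : List Int) (sk : Int) :
    ∀ (m j : Nat) (out : List Int), j + m = state.length →
    kickLoop state (some sk) m (j : Int) out
    = out ++ ((PySem.List.enumerate (state.drop j) (j : Int)).map
        (fun p => if p.1 < 4 ∧ ¬ p.1 = sk then p.2 + 1 else p.2)).map
        (fun v => if v > 4 then 1 else v) := by
  intro m
  induction m with
  | zero =>
    intro j out hj
    simp [kickLoop, List.drop_eq_nil_of_le (by omega : state.length ≤ j),
          PySem.List.enumerate_nil]
  | succ m ih =>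
    intro j out hj
    have hjl : j < state.length := by omega
    have hget : PySem.List.pyGetD state (j : Int) 0 = state[j] := by
      rw [PySem.List.pyGetD_natCast]; exact List.getD_eq_getElem state 0 hjl
    have hcast : ((j : Int) + 1) = (((j + 1 : Nat)) : Int) := by push_cast; ring
    rw [show kickLoop state (some sk) (m + 1) (j : Int) out
        = kickLoop state (some sk) m ((j : Int) + 1)
            (out ++ [if (if (j : Int) < 4 ∧ (j : Int) ≠ sk
                        then PySem.List.pyGetD state (j : Int) 0 + 1
                        else PySem.List.pyGetD state (j : Int) 0) > 4
                     then 1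
                     else (if (j : Int) < 4 ∧ (j : Int) ≠ sk
                           then PySem.List.pyGetD state (j : Int) 0 + 1
                           else PySem.List.pyGetD state (j : Int) 0)]) from rfl,
       hcast, ih (j + 1) _ (by omega)]
    rw [List.drop_eq_getElem_cons hjl, PySem.List.enumerate_cons, List.map_cons, List.map_cons]
    rw [List.append_assoc, hget, ← hcast]
    rfl

-- B's while loop with skip = none only clamps
theorem kickLoop_none (state : List Int) :
    ∀ (m j : Nat) (out : List Int), j + m = state.length →
    kickLoop state none m (j : Int) out
    = out ++ (state.drop j).map (fun v => if v > 4 then 1 else v) := by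
  intro m
  induction m with
  | zero =>
    intro j out hj
    simp [kickLoop, List.drop_eq_nil_of_le (by omega : state.length ≤ j)]
  | succ m ih =>
    intro j out hj
    have hjl : j < state.length := by omega
    have hget : PySem.List.pyGetD state (j : Int) 0 = state[j] := by
      rw [PySem.List.pyGetD_natCast]; exact List.getD_eq_getElem state 0 hjl
    have hcast : ((j : Int) + 1) = (((j + 1 : Nat)) : Int) := by push_cast; ring
    rw [show kickLoop state none (m + 1) (j : Int) out
        = kickLoop state none m ((j : Int) + 1)
            (out ++ [if PySem.List.pyGetD state (j : Int) 0 > 4 then 1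
                     else PySem.List.pyGetD state (j : Int) 0]) from rfl,
       hcast, ih (j + 1) _ (by omega)]
    rw [List.drop_eq_getElem_cons hjl, List.map_cons, List.append_assoc, hget]
    rfl

theorem kick_alt_some (state : List Int) (place : Int)
    (h : 0 ≤ place ∧ place ≤ 3) :
    kick_alt state place
    = ((PySem.List.enumerate state).map
        (fun p => if p.1 < 4 ∧ ¬ p.1 = (3 - place) then p.2 + 1 else p.2)).map
        (fun v => if v > 4 then 1 else v) := by
  unfold kick_alt
  rw [if_pos h]
  have := kickLoop_some state (3 - place) state.length 0 [] (by omega)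
  simpa [PySem.List.enumerate] using this

theorem kick_alt_none (state : List Int) (place : Int)
    (h : ¬ (0 ≤ place ∧ place ≤ 3)) :
    kick_alt state place = state.map (fun v => if v > 4 then 1 else v) := by
  unfold kick_alt
  rw [if_neg h]
  have := kickLoop_none state state.length 0 [] (by omega)
  simpa using this

-- ===== VERDICT (by name: the statement is the Claim_ definition above) =====
theorem kick_spec : Claim_equal_kick := by
  intro state place _ hpre
  unfold Spec_kick kick
  by_cases h0 : place = 0
  · subst h0
    have hlen : 3 ≤ state.length := hpre.1 rfl
    have h := case_core state 0 1 2 3 (by omega) (by omega) (by omega)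
      (by omega) (by omega) (by omega) (by intro k; push_cast; omega)
    rw [kick_alt_some state 0 (by omega)]
    push_cast at h
    norm_num at h ⊢
    exact h
  · by_cases h1 : place = 1
    · subst h1
      have hlen : 4 ≤ state.length := hpre.2 (Or.inl rfl)
      have h := case_core state 1 0 3 2 (by omega) (by omega) (by omega)
        (by omega) (by omega) (by omega) (by intro k; push_cast; omega)
      rw [kick_alt_some state 1 (by omega)]
      push_cast at h
      norm_num at h ⊢
      exact h
    · by_cases h2 : place = 2
      · subst h2
        have hlen : 4 ≤ state.length := hpre.2 (Or.inr (Or.inl rfl))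
        have h := case_core state 2 3 0 1 (by omega) (by omega) (by omega)
          (by omega) (by omega) (by omega) (by intro k; push_cast; omega)
        rw [kick_alt_some state 2 (by omega)]
        push_cast at h
        norm_num at h ⊢
        exact h
      · by_cases h3 : place = 3
        · subst h3
          have hlen : 4 ≤ state.length := hpre.2 (Or.inr (Or.inr rfl))
          have h := case_core state 3 2 1 0 (by omega) (by omega) (by omega)
            (by omega) (by omega) (by omega) (by intro k; push_cast; omega)
          rw [kick_alt_some state 3 (by omega)]
          push_cast at h
          norm_num at h ⊢
          exact h
        · rw [kick_alt_none state place (by omega)]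
          simp only [if_neg h0, if_neg h1, if_neg h2, if_neg h3]
          exact clamp_fold state
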